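-- pv_equiv track=rewrite | github.com/kallsmyr/algodatlabbar | solution3.py | people
-- ===== SOURCE A (Python) =====
-- def people(N,pairs,weights): #Dictionary av dictionary (coolt)
--     dict = {} #Key är en person, value är en dictionary för alla dess vänner
--     # Inre dictionary för varje vän: key är vän value är viken av vänskapen
--     for i in range(1,N+1):
--         dict.update({i:[]})
--         for idx,p in enumerate(pairs):
--             if (p[0] == i):
--                 dict[i].append((p[1],weights[idx]))
--                 #dict[i].append(p[1])
--                 #dict[i[1]].append(weights[idx])
--             elif (p[1] == i):
--                 dict[i].append((p[0],weights[idx]))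
--                 #dict[i[0]].append(p[0])
--                 #dict[i[1]].append(weights[idx])
--     for kvp in dict: #Tänk om
--         dict[kvp] = sorted(dict[kvp], key= lambda ele: ele[1])
--     return dict
-- ===== SOURCE B (Python) =====
-- def people(N, pairs, weights):
--     # Build keys 1..N once, sort the edge records globally (stable) by weight,
--     # then distribute in one pass; stability makes each per-person list sorted.
--     d = {i: [] for i in range(1, N + 1)}
--     records = sorted(((w, a, b) for (a, b), w in zip(pairs, weights)),
--                      key=lambda r: r[0])
--     for w, a, b in records:
--         if a in d:
--             d[a].append((b, w))
--         if b in d and b != a: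
--             d[b].append((a, w))
--     return d
-- ===== Notes on version B (the rewrite author's own statement) =====
-- stated objective: faster
-- what changed: Instead of scanning all pairs once per person (N passes) and then sorting each person's list, B builds the empty dict for keys 1..N, stably sorts the (weight, a, b) records once globally, and distributes them in a single pass, relying on sort stability to leave every per-person list already in A's order.
import Mathlib
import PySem

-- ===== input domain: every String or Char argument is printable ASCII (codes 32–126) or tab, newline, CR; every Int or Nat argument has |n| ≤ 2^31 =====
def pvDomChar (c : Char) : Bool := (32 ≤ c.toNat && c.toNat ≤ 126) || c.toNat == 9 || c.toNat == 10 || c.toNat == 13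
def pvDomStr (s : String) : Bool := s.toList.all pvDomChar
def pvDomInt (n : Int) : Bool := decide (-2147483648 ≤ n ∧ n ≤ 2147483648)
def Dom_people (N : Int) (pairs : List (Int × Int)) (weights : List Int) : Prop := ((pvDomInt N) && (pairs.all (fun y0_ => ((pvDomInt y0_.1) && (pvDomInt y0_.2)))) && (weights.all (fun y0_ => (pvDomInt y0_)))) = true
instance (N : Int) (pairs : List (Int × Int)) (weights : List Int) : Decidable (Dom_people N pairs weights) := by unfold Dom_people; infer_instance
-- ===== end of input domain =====

-- B builds the adjacency dict by one global stable sort of the (weight, a, b) records followed by a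
-- single distribution pass, instead of A's scan of all pairs for every person plus a per-person sort.

-- ===== PORT A =====
def people (N : Int) (pairs : List (Int × Int)) (weights : List Int) : List (Int × List (Int × Int)) :=
  let d : PySem.Dict Int (List (Int × Int)) :=
    (PySem.List.pyRange 1 (N+1) 1).foldl (fun d i =>
      (PySem.List.enumerate pairs 0).foldl (fun d q =>
          if q.2.1 == i then d.modify i [] (· ++ [(q.2.2, PySem.List.pyGetD weights q.1 0)])
          else if q.2.2 == i then d.modify i [] (· ++ [(q.2.1, PySem.List.pyGetD weights q.1 0)])
          else d)
        (d.insert i []))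
      PySem.Dict.empty
  let d := d.keys.foldl (fun d k => d.insert k (PySem.List.sorted (d.getD k []) (fun e => e.2))) d
  d.items

-- ===== PORT B =====
def people_alt (N : Int) (pairs : List (Int × Int)) (weights : List Int) : List (Int × List (Int × Int)) :=
  let d0 : PySem.Dict Int (List (Int × Int)) :=
    (PySem.List.pyRange 1 (N+1) 1).foldl (fun d i => d.insert i []) PySem.Dict.empty
  let records := PySem.List.sorted ((pairs.zip weights).map (fun pw => (pw.2, pw.1.1, pw.1.2))) (fun r => r.1)
  let d := records.foldl (fun d r =>
      let d := if d.contains r.2.1 then d.modify r.2.1 [] (· ++ [(r.2.2, r.1)]) else d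
      if d.contains r.2.2 && !(r.2.2 == r.2.1) then d.modify r.2.2 [] (· ++ [(r.2.1, r.1)]) else d)
    d0
  d.items

-- ===== PRECONDITION & SPEC =====
-- Pre_ excludes exactly the inputs on which A raises IndexError: a pair whose index has no weight
-- while one of its endpoints lies in 1..N (A then evaluates weights[idx] out of range).
def Pre_people (N : Int) (pairs : List (Int × Int)) (weights : List Int) : Prop :=
  ∀ q ∈ PySem.List.enumerate pairs 0,
    ((1 ≤ q.2.1 ∧ q.2.1 ≤ N) ∨ (1 ≤ q.2.2 ∧ q.2.2 ≤ N)) → q.1 < (weights.length : Int)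
instance (N : Int) (pairs : List (Int × Int)) (weights : List Int) : Decidable (Pre_people N pairs weights) := by unfold Pre_people; infer_instance
def pvWitness_people : Int × (List (Int × Int)) × List Int := (2, [(1, 2), (2, 1)], [5, 3])

def Spec_people (N : Int) (pairs : List (Int × Int)) (weights : List Int) (out : List (Int × List (Int × Int))) : Prop := out = people_alt N pairs weights
instance (N : Int) (pairs : List (Int × Int)) (weights : List Int) (out : List (Int × List (Int × Int))) : Decidable (Spec_people N pairs weights out) := by unfold Spec_people; infer_instance

-- ===== CLAIM (what is proved, stated in full; the proofs are below) =====
def Claim_equal_people : Prop := ∀ (N : Int) (pairs : List (Int × Int)) (weights : List Int), Dom_people N pairs weights → Pre_people N pairs weights → Spec_people N pairs weights (people N pairs weights)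

-- ===== LEMMAS AND PROOFS =====

-- the match test and the partner picked for person i from a pair (a, b)
def pvHit (i a b : Int) : Bool := a == i || b == i
def pvOut (i a b : Int) : Int := if a == i then b else a

-- A's per-person list before its final sort
def pvPreA (i : Int) (pairs : List (Int × Int)) (weights : List Int) : List (Int × Int) :=
  ((PySem.List.enumerate pairs 0).filter (fun q => pvHit i q.2.1 q.2.2)).map
    (fun q => (pvOut i q.2.1 q.2.2, PySem.List.pyGetD weights q.1 0))

-- B's sorted record list
def pvRecs (pairs : List (Int × Int)) (weights : List Int) : List (Int × Int × Int) :=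
  PySem.List.sorted ((pairs.zip weights).map (fun pw => (pw.2, pw.1.1, pw.1.2))) (fun r => r.1)

-- ---- generic stable-sort lemmas (insertion sort: filter and map commute with sorting) ----

theorem pv_insertBy_all_before {α : Type} (bf : α → α → Bool) (x : α) (l : List α)
    (h : ∀ z ∈ l, bf x z = true) : PySem.List.insertBy bf x l = x :: l := by
  cases l with
  | nil => rfl
  | cons y ys => simp [PySem.List.insertBy, h y (by simp)]

theorem pv_pairwise_insertBy {α : Type} (key : α → Int) (x : α) (ys : List α)
    (h : ys.Pairwise (fun a b => key a ≤ key b)) :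
    (PySem.List.insertBy (fun a b => decide (key a < key b)) x ys).Pairwise (fun a b => key a ≤ key b) := by
  induction ys with
  | nil => simp [PySem.List.insertBy]
  | cons y ys ih =>
    rw [List.pairwise_cons] at h
    by_cases hxy : key x < key y
    · rw [PySem.List.insertBy]
      simp only [hxy, decide_true, if_true]
      refine List.Pairwise.cons ?_ (List.Pairwise.cons h.1 h.2)
      intro z hz
      rcases List.mem_cons.mp hz with rfl | hz
      · exact le_of_lt hxy
      · exact le_trans (le_of_lt hxy) (h.1 z hz)
    · rw [PySem.List.insertBy]
      simp only [hxy, decide_false, if_false]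
      refine List.Pairwise.cons ?_ (ih h.2)
      intro z hz
      rcases (PySem.List.mem_insertBy _ _ _ _).mp hz with rfl | hz
      · exact le_of_not_gt hxy
      · exact h.1 z hz

theorem pv_filter_insertBy {α : Type} (key : α → Int) (p : α → Bool) (x : α) (ys : List α)
    (h : ys.Pairwise (fun a b => key a ≤ key b)) :
    (PySem.List.insertBy (fun a b => decide (key a < key b)) x ys).filter p
      = if p x then PySem.List.insertBy (fun a b => decide (key a < key b)) x (ys.filter p) else ys.filter p := by
  induction ys with
  | nil => by_cases hp : p x <;> simp [PySem.List.insertBy, hp]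
  | cons y ys ih =>
    rw [List.pairwise_cons] at h
    by_cases hxy : key x < key y
    · rw [PySem.List.insertBy]
      simp only [hxy, decide_true, if_true]
      by_cases hp : p x
      · simp only [hp, List.filter_cons, if_pos hp, if_true]
        by_cases hpy : p y
        · simp only [hpy, if_true]
          rw [PySem.List.insertBy]
          simp [hxy]
        · simp only [hpy, if_false, Bool.false_eq_true]
          rw [pv_insertBy_all_before]
          intro z hz
          rcases List.mem_filter.mp hz with ⟨hz, _⟩
          exact decide_eq_true (lt_of_lt_of_le hxy (h.1 z hz))
      · simp [hp]
    · rw [PySem.List.insertBy]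
      simp only [hxy, decide_false, Bool.false_eq_true, if_false]
      rw [List.filter_cons, List.filter_cons, ih h.2]
      by_cases hpy : p y
      · simp only [hpy, if_true]
        by_cases hp : p x
        · simp only [hp, if_true]
          rw [PySem.List.insertBy]
          simp [hxy]
        · simp [hp]
      · simp [hpy]

theorem pv_filter_sorted_aux {α : Type} (key : α → Int) (p : α → Bool) :
    ∀ (xs acc : List α), acc.Pairwise (fun a b => key a ≤ key b) →
    (xs.foldl (fun acc x => PySem.List.insertBy (fun a b => decide (key a < key b)) x acc) acc).filter p
      = (xs.filter p).foldl (fun acc x => PySem.List.insertBy (fun a b => decide (key a < key b)) x acc) (acc.filter p) := by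
  intro xs
  induction xs with
  | nil => intro acc _; simp
  | cons x xs ih =>
    intro acc hacc
    rw [List.foldl_cons, ih _ (pv_pairwise_insertBy key x acc hacc), pv_filter_insertBy key p x acc hacc,
      List.filter_cons]
    by_cases hp : p x <;> simp [hp]

theorem pv_filter_sorted {α : Type} (key : α → Int) (p : α → Bool) (xs : List α) :
    (PySem.List.sorted xs key).filter p = PySem.List.sorted (xs.filter p) key := by
  rw [PySem.List.sorted_eq_foldl_insertBy, PySem.List.sorted_eq_foldl_insertBy]
  simpa using pv_filter_sorted_aux key p xs [] (by simp)

theorem pv_map_insertBy {α β : Type} (keyA : α → Int) (keyB : β → Int) (g : α → β)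
    (hk : ∀ a, keyB (g a) = keyA a) (x : α) (ys : List α) :
    (PySem.List.insertBy (fun a b => decide (keyA a < keyA b)) x ys).map g
      = PySem.List.insertBy (fun a b => decide (keyB a < keyB b)) (g x) (ys.map g) := by
  induction ys with
  | nil => rfl
  | cons y ys ih =>
    rw [PySem.List.insertBy]
    by_cases hxy : keyA x < keyA y
    · simp [hxy, PySem.List.insertBy, hk]
    · simp only [hxy, decide_false, Bool.false_eq_true, if_false, List.map_cons, ih]
      rw [PySem.List.insertBy]
      simp [hk, hxy]

theorem pv_map_sorted {α β : Type} (keyA : α → Int) (keyB : β → Int) (g : α → β)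
    (hk : ∀ a, keyB (g a) = keyA a) (xs : List α) :
    (PySem.List.sorted xs keyA).map g = PySem.List.sorted (xs.map g) keyB := by
  rw [PySem.List.sorted_eq_foldl_insertBy, PySem.List.sorted_eq_foldl_insertBy]
  suffices h : ∀ (acc : List α),
      (xs.foldl (fun acc x => PySem.List.insertBy (fun a b => decide (keyA a < keyA b)) x acc) acc).map g
        = (xs.map g).foldl (fun acc x => PySem.List.insertBy (fun a b => decide (keyB a < keyB b)) x acc) (acc.map g) by
    simpa using h []
  induction xs with
  | nil => intro acc; simp
  | cons x xs ih =>
    intro acc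
    rw [List.foldl_cons, ih, pv_map_insertBy keyA keyB g hk, List.map_cons, List.foldl_cons]

-- A's inner loop over the enumerated pairs, for a fixed person i already in the dict
theorem pv_A_inner (i : Int) (ws : List Int) :
    ∀ (l : List (Int × (Int × Int))) (d : PySem.Dict Int (List (Int × Int))),
      d.contains i = true →
      (l.foldl (fun d q =>
          if q.2.1 == i then d.modify i [] (· ++ [(q.2.2, PySem.List.pyGetD ws q.1 0)])
          else if q.2.2 == i then d.modify i [] (· ++ [(q.2.1, PySem.List.pyGetD ws q.1 0)])
          else d) d).keys = d.keys ∧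
      ∀ j, (l.foldl (fun d q =>
          if q.2.1 == i then d.modify i [] (· ++ [(q.2.2, PySem.List.pyGetD ws q.1 0)])
          else if q.2.2 == i then d.modify i [] (· ++ [(q.2.1, PySem.List.pyGetD ws q.1 0)])
          else d) d).getD j []
        = d.getD j [] ++ (if j = i then
            (l.filter (fun q => pvHit i q.2.1 q.2.2)).map
              (fun q => (pvOut i q.2.1 q.2.2, PySem.List.pyGetD ws q.1 0)) else []) := by
  intro l
  induction l with
  | nil => intro d hc; refine ⟨rfl, fun j => by simp⟩
  | cons q l ih =>
    intro d hc
    by_cases h1 : q.2.1 == i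
    · have hd' : (d.modify i [] (· ++ [(q.2.2, PySem.List.pyGetD ws q.1 0)])).contains i = true := by
        simp [PySem.Dict.contains_modify]
      obtain ⟨hk, hg⟩ := ih (d.modify i [] (· ++ [(q.2.2, PySem.List.pyGetD ws q.1 0)])) hd'
      constructor
      · rw [List.foldl_cons, if_pos h1, hk, PySem.Dict.keys_modify,
          PySem.Dict.keys_insert_of_contains _ _ hc]
      · intro j
        rw [List.foldl_cons, if_pos h1, hg j, List.filter_cons]
        by_cases hj : j = i
        · subst hj
          simp [PySem.Dict.getD_modify_self, pvHit, pvOut, h1, eq_of_beq h1]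
        · simp [PySem.Dict.getD_modify_of_ne _ _ _ hj, hj]
    · by_cases h2 : q.2.2 == i
      · have hd' : (d.modify i [] (· ++ [(q.2.1, PySem.List.pyGetD ws q.1 0)])).contains i = true := by
          simp [PySem.Dict.contains_modify]
        obtain ⟨hk, hg⟩ := ih (d.modify i [] (· ++ [(q.2.1, PySem.List.pyGetD ws q.1 0)])) hd'
        constructor
        · rw [List.foldl_cons, if_neg (by simp [h1]), if_pos h2, hk, PySem.Dict.keys_modify,
            PySem.Dict.keys_insert_of_contains _ _ hc]
        · intro j
          rw [List.foldl_cons, if_neg (by simp [h1]), if_pos h2, hg j, List.filter_cons]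
          by_cases hj : j = i
          · subst hj
            simp [PySem.Dict.getD_modify_self, pvHit, pvOut, h1, h2]
            intro h
            exact absurd h (by simpa using h1)
          · simp [PySem.Dict.getD_modify_of_ne _ _ _ hj, hj]
      · obtain ⟨hk, hg⟩ := ih d hc
        constructor
        · rw [List.foldl_cons, if_neg (by simp [h1]), if_neg (by simp [h2]), hk]
        · intro j
          rw [List.foldl_cons, if_neg (by simp [h1]), if_neg (by simp [h2]), hg j, List.filter_cons]
          simp [pvHit, h1, h2]

theorem pv_contains_false_iff {d : PySem.Dict Int (List (Int × Int))} {x : Int} :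
    d.contains x = false ↔ x ∉ d.keys := by
  rw [← Bool.not_eq_true, not_iff_not]
  exact PySem.Dict.contains_iff_mem_keys d x

theorem pv_A_outer (pairs : List (Int × Int)) (weights : List Int) :
    ∀ (l : List Int) (d : PySem.Dict Int (List (Int × Int))), l.Nodup →
      (∀ x ∈ l, d.contains x = false) →
      (l.foldl (fun d i =>
        (PySem.List.enumerate pairs 0).foldl (fun d q =>
          if q.2.1 == i then d.modify i [] (· ++ [(q.2.2, PySem.List.pyGetD weights q.1 0)])
          else if q.2.2 == i then d.modify i [] (· ++ [(q.2.1, PySem.List.pyGetD weights q.1 0)])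
          else d) (d.insert i [])) d).keys = d.keys ++ l ∧
      ∀ j, (l.foldl (fun d i =>
        (PySem.List.enumerate pairs 0).foldl (fun d q =>
          if q.2.1 == i then d.modify i [] (· ++ [(q.2.2, PySem.List.pyGetD weights q.1 0)])
          else if q.2.2 == i then d.modify i [] (· ++ [(q.2.1, PySem.List.pyGetD weights q.1 0)])
          else d) (d.insert i [])) d).getD j []
        = if j ∈ l then pvPreA j pairs weights else d.getD j [] := by
  intro l
  induction l with
  | nil => intro d _ _; exact ⟨by simp, fun j => by simp⟩
  | cons i l ih =>
    intro d hnd hf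
    have hci : d.contains i = false := hf i (by simp)
    have hci' : (d.insert i ([] : List (Int × Int))).contains i = true :=
      PySem.Dict.contains_insert_self d i []
    obtain ⟨hk1, hg1⟩ := pv_A_inner i weights (PySem.List.enumerate pairs 0) (d.insert i []) hci'
    have hkeys' : ((PySem.List.enumerate pairs 0).foldl (fun d q =>
          if q.2.1 == i then d.modify i [] (· ++ [(q.2.2, PySem.List.pyGetD weights q.1 0)])
          else if q.2.2 == i then d.modify i [] (· ++ [(q.2.1, PySem.List.pyGetD weights q.1 0)])
          else d) (d.insert i [])).keys = d.keys ++ [i] := by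
      rw [hk1, PySem.Dict.keys_insert_of_not_contains d [] hci]
    have hfresh' : ∀ x ∈ l, ((PySem.List.enumerate pairs 0).foldl (fun d q =>
          if q.2.1 == i then d.modify i [] (· ++ [(q.2.2, PySem.List.pyGetD weights q.1 0)])
          else if q.2.2 == i then d.modify i [] (· ++ [(q.2.1, PySem.List.pyGetD weights q.1 0)])
          else d) (d.insert i [])).contains x = false := by
      intro x hx
      rw [pv_contains_false_iff, hkeys']
      intro hmem
      rcases List.mem_append.mp hmem with h | h
      · exact (pv_contains_false_iff.mp (hf x (by simp [hx]))) h
      · exact ((List.pairwise_cons.mp hnd).1 x hx) (List.mem_singleton.mp h).symm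
    obtain ⟨hk2, hg2⟩ := ih _ hnd.of_cons hfresh'
    constructor
    · rw [List.foldl_cons, hk2, hkeys', List.append_assoc]; rfl
    · intro j
      rw [List.foldl_cons, hg2 j]
      by_cases hjl : j ∈ l
      · simp [hjl]
      · by_cases hji : j = i
        · subst hji
          have := hg1 j
          rw [if_pos rfl] at this
          simp only [hjl, if_false, List.mem_cons]
          rw [this, PySem.Dict.getD_insert]
          simp [pvPreA]
        · simp only [hjl, if_false, List.mem_cons]
          have := hg1 j
          rw [if_neg hji] at this
          rw [this, PySem.Dict.getD_insert, if_neg hji]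
          simp [hji, hjl]

theorem pv_sortloop :
    ∀ (ks : List Int) (d : PySem.Dict Int (List (Int × Int))), ks.Nodup →
      (∀ k ∈ ks, d.contains k = true) →
      ((ks.foldl (fun d k => d.insert k (PySem.List.sorted (d.getD k []) (fun e => e.2))) d).keys = d.keys) ∧
      ∀ j, (ks.foldl (fun d k => d.insert k (PySem.List.sorted (d.getD k []) (fun e => e.2))) d).getD j []
        = if j ∈ ks then PySem.List.sorted (d.getD j []) (fun e => e.2) else d.getD j [] := by
  intro ks
  induction ks with
  | nil => intro d _ _; exact ⟨rfl, fun j => by simp⟩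
  | cons k ks ih =>
    intro d hnd hc
    have hck : d.contains k = true := hc k (by simp)
    have hkeys' : (d.insert k (PySem.List.sorted (d.getD k []) (fun e => e.2))).keys = d.keys :=
      PySem.Dict.keys_insert_of_contains d _ hck
    have hc' : ∀ x ∈ ks, (d.insert k (PySem.List.sorted (d.getD k []) (fun e => e.2))).contains x = true := by
      intro x hx
      rw [PySem.Dict.contains_insert]
      simp [hc x (by simp [hx])]
    obtain ⟨hk2, hg2⟩ := ih _ hnd.of_cons hc'
    constructor
    · rw [List.foldl_cons, hk2, hkeys']
    · intro j
      rw [List.foldl_cons, hg2 j]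
      by_cases hjk : j ∈ ks
      · rw [if_pos hjk, if_pos (by simp [hjk]), PySem.Dict.getD_insert,
          if_neg (fun h => ((List.pairwise_cons.mp hnd).1 j hjk) h.symm)]
      · by_cases hji : j = k
        · subst hji
          rw [if_neg hjk, if_pos (by simp), PySem.Dict.getD_insert, if_pos rfl]
        · rw [if_neg hjk, if_neg (by simp [hji, hjk]), PySem.Dict.getD_insert, if_neg hji]

def pvD1 (N : Int) (pairs : List (Int × Int)) (weights : List Int) : PySem.Dict Int (List (Int × Int)) :=
  (PySem.List.pyRange 1 (N+1) 1).foldl (fun d i =>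
      (PySem.List.enumerate pairs 0).foldl (fun d q =>
          if q.2.1 == i then d.modify i [] (· ++ [(q.2.2, PySem.List.pyGetD weights q.1 0)])
          else if q.2.2 == i then d.modify i [] (· ++ [(q.2.1, PySem.List.pyGetD weights q.1 0)])
          else d)
        (d.insert i []))
      PySem.Dict.empty

theorem pv_A_items (N : Int) (pairs : List (Int × Int)) (weights : List Int) :
    people N pairs weights
      = (PySem.List.pyRange 1 (N+1) 1).map
          (fun i => (i, PySem.List.sorted (pvPreA i pairs weights) (fun e => e.2))) := by
  have hpeople : people N pairs weights
      = ((pvD1 N pairs weights).keys.foldl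
          (fun d k => d.insert k (PySem.List.sorted (d.getD k []) (fun e => e.2)))
          (pvD1 N pairs weights)).items := rfl
  obtain ⟨hk1, hg1⟩ := pv_A_outer pairs weights (PySem.List.pyRange 1 (N+1) 1) PySem.Dict.empty
    (PySem.List.nodup_pyRange_one 1 (N+1)) (fun x _ => rfl)
  have hk1' : (pvD1 N pairs weights).keys = PySem.List.pyRange 1 (N+1) 1 := by
    rw [show (pvD1 N pairs weights).keys = _ from congrArg PySem.Dict.keys rfl, pvD1]
    exact hk1.trans (by simp)
  have hnd : (pvD1 N pairs weights).keys.Nodup := by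
    rw [hk1']; exact PySem.List.nodup_pyRange_one 1 (N+1)
  obtain ⟨hk2, hg2⟩ := pv_sortloop (pvD1 N pairs weights).keys (pvD1 N pairs weights) hnd
    (fun k hk => (PySem.Dict.contains_iff_mem_keys _ _).mpr hk)
  rw [hpeople, PySem.Dict.items_eq_map_keys _ (by rw [hk2]; exact hnd) [], hk2]
  have hmap : ∀ i ∈ (pvD1 N pairs weights).keys,
      (i, ((pvD1 N pairs weights).keys.foldl
          (fun d k => d.insert k (PySem.List.sorted (d.getD k []) (fun e => e.2)))
          (pvD1 N pairs weights)).getD i [])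
        = (i, PySem.List.sorted (pvPreA i pairs weights) (fun e => e.2)) := by
    intro i hi
    rw [hg2 i, if_pos hi]
    have := hg1 i
    rw [if_pos (hk1' ▸ hi)] at this
    rw [show (pvD1 N pairs weights).getD i [] = pvPreA i pairs weights from this]
  rw [List.map_congr_left hmap, hk1']

-- modifying an already-present key changes no membership
theorem pv_contains_modify_inv (d : PySem.Dict Int (List (Int × Int))) (k : Int)
    (f : List (Int × Int) → List (Int × Int)) (h : d.contains k = true) :
    ∀ x, (d.modify k [] f).contains x = d.contains x := by
  intro x
  rw [PySem.Dict.contains_modify]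
  by_cases hx : x = k
  · subst hx; simp [h]
  · simp [hx]

theorem pv_B_fold :
    ∀ (recs : List (Int × Int × Int)) (d : PySem.Dict Int (List (Int × Int))),
      ((recs.foldl (fun d r =>
          let d' := if d.contains r.2.1 then d.modify r.2.1 [] (· ++ [(r.2.2, r.1)]) else d
          if d'.contains r.2.2 && !(r.2.2 == r.2.1) then d'.modify r.2.2 [] (· ++ [(r.2.1, r.1)]) else d') d).keys
        = d.keys) ∧
      (∀ x, (recs.foldl (fun d r =>
          let d' := if d.contains r.2.1 then d.modify r.2.1 [] (· ++ [(r.2.2, r.1)]) else d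
          if d'.contains r.2.2 && !(r.2.2 == r.2.1) then d'.modify r.2.2 [] (· ++ [(r.2.1, r.1)]) else d') d).contains x
        = d.contains x) ∧
      ∀ j, d.contains j = true →
        (recs.foldl (fun d r =>
          let d' := if d.contains r.2.1 then d.modify r.2.1 [] (· ++ [(r.2.2, r.1)]) else d
          if d'.contains r.2.2 && !(r.2.2 == r.2.1) then d'.modify r.2.2 [] (· ++ [(r.2.1, r.1)]) else d') d).getD j []
        = d.getD j [] ++ (recs.filter (fun r => pvHit j r.2.1 r.2.2)).map (fun r => (pvOut j r.2.1 r.2.2, r.1)) := by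
  intro recs
  induction recs with
  | nil => intro d; exact ⟨rfl, fun x => rfl, fun j _ => by simp⟩
  | cons r recs ih =>
    intro d
    -- the dict after the first branch
    set d1 := if d.contains r.2.1 then d.modify r.2.1 [] (· ++ [(r.2.2, r.1)]) else d with hd1
    have hc1 : ∀ x, d1.contains x = d.contains x := by
      intro x
      rw [hd1]
      by_cases ha : d.contains r.2.1
      · rw [if_pos ha]; exact pv_contains_modify_inv d r.2.1 _ ha x
      · rw [if_neg ha]
    -- the dict after the second branch
    set d2 := if d1.contains r.2.2 && !(r.2.2 == r.2.1) then d1.modify r.2.2 [] (· ++ [(r.2.1, r.1)]) else d1 with hd2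
    have hc2 : ∀ x, d2.contains x = d.contains x := by
      intro x
      rw [hd2]
      by_cases hg : d1.contains r.2.2 && !(r.2.2 == r.2.1)
      · rw [if_pos hg]
        rw [pv_contains_modify_inv d1 r.2.2 _ (by rw [Bool.and_eq_true] at hg; exact hg.1) x]
        exact hc1 x
      · rw [if_neg hg]; exact hc1 x
    obtain ⟨ihk, ihc, ihg⟩ := ih d2
    have hk1 : d1.keys = d.keys := by
      rw [hd1]
      by_cases ha : d.contains r.2.1
      · rw [if_pos ha, PySem.Dict.keys_modify, PySem.Dict.keys_insert_of_contains _ _ ha]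
      · rw [if_neg ha]
    have hk2 : d2.keys = d.keys := by
      rw [hd2]
      by_cases hg : d1.contains r.2.2 && !(r.2.2 == r.2.1)
      · rw [Bool.and_eq_true] at hg
        rw [if_pos (by rw [Bool.and_eq_true]; exact hg), PySem.Dict.keys_modify,
          PySem.Dict.keys_insert_of_contains _ _ hg.1, hk1]
      · rw [if_neg hg]; exact hk1
    refine ⟨?_, ?_, ?_⟩
    · rw [List.foldl_cons]
      exact ihk.trans hk2
    · intro x
      rw [List.foldl_cons]
      exact (ihc x).trans (hc2 x)
    · intro j hj
      rw [List.foldl_cons, ihg j (by rw [hc2 j]; exact hj), List.filter_cons]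
      have hg1 : d1.getD j [] = d.getD j [] ++ (if r.2.1 == j then [(r.2.2, r.1)] else []) := by
        rw [hd1]
        by_cases haj : r.2.1 = j
        · subst haj
          rw [if_pos hj, PySem.Dict.getD_modify_self]
          simp
        · by_cases ha : d.contains r.2.1
          · rw [if_pos ha, PySem.Dict.getD_modify_of_ne _ _ _ (fun h => haj h.symm)]
            simp [haj]
          · rw [if_neg ha]
            simp [haj]
      have hg2d : d2.getD j [] = d1.getD j []
          ++ (if r.2.2 == j && !(r.2.2 == r.2.1) then [(r.2.1, r.1)] else []) := by
        rw [hd2]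
        by_cases hbj : r.2.2 = j ∧ r.2.2 ≠ r.2.1
        · have hcb : d1.contains r.2.2 = true := by rw [hc1, hbj.1]; exact hj
          have hja : ¬ j = r.2.1 := fun h => hbj.2 (hbj.1.trans h)
          rw [if_pos (by simp [hcb, hbj.2]), hbj.1, PySem.Dict.getD_modify_self]
          simp [hbj.1, hbj.2, hja]
        · have hcond : (r.2.2 == j && !(r.2.2 == r.2.1)) = false := by
            rcases not_and_or.mp hbj with h | h
            · simp [h]
            · simp at h
              simp [h]
          rw [hcond]
          by_cases hg : d1.contains r.2.2 && !(r.2.2 == r.2.1)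
          · have hbne : r.2.2 ≠ j := by
              intro he
              rw [Bool.and_eq_true] at hg
              exact hbj ⟨he, by simpa using hg.2⟩
            rw [if_pos hg, PySem.Dict.getD_modify_of_ne _ _ _ (fun h => hbne h.symm)]
            simp
          · rw [if_neg hg]; simp
      rw [hg2d, hg1, List.append_assoc, List.append_assoc]
      congr 1
      rw [← List.append_assoc]
      congr 1
      by_cases haj : r.2.1 = j
      · subst haj
        by_cases hbj : r.2.2 = r.2.1
        · simp [pvHit, pvOut, hbj]
        · simp [pvHit, pvOut, fun h => hbj (eq_of_beq h)]
      · by_cases hbj : r.2.2 = j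
        · have hba : r.2.2 ≠ r.2.1 := by rw [hbj]; exact fun h => haj h.symm
          have hja : ¬ j = r.2.1 := fun h => haj h.symm
          simp [pvHit, pvOut, haj, hbj, hba, hja]
        · simp [pvHit, pvOut, haj, hbj, fun h => haj (eq_of_beq h), fun h => hbj (eq_of_beq h)]

theorem pv_d0 :
    ∀ (l : List Int) (d : PySem.Dict Int (List (Int × Int))), l.Nodup →
      (∀ x ∈ l, d.contains x = false) →
      ((l.foldl (fun d i => d.insert i []) d).keys = d.keys ++ l) ∧
      ∀ j, (l.foldl (fun d i => d.insert i []) d).getD j [] = d.getD j [] := by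
  intro l
  induction l with
  | nil => intro d _ _; exact ⟨by simp, fun j => rfl⟩
  | cons i l ih =>
    intro d hnd hf
    have hci : d.contains i = false := hf i (by simp)
    have hkeys' : (d.insert i ([] : List (Int × Int))).keys = d.keys ++ [i] :=
      PySem.Dict.keys_insert_of_not_contains d [] hci
    have hfresh' : ∀ x ∈ l, (d.insert i ([] : List (Int × Int))).contains x = false := by
      intro x hx
      rw [pv_contains_false_iff, hkeys']
      intro hmem
      rcases List.mem_append.mp hmem with h | h
      · exact (pv_contains_false_iff.mp (hf x (by simp [hx]))) h
      · exact ((List.pairwise_cons.mp hnd).1 x hx) (List.mem_singleton.mp h).symm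
    obtain ⟨hk, hg⟩ := ih _ hnd.of_cons hfresh'
    refine ⟨by rw [List.foldl_cons, hk, hkeys', List.append_assoc]; rfl, ?_⟩
    intro j
    rw [List.foldl_cons, hg j, PySem.Dict.getD_insert]
    by_cases hj : j = i
    · subst hj
      rw [if_pos rfl, PySem.Dict.getD_of_not_contains d [] hci]
    · rw [if_neg hj]

theorem pv_B_items (N : Int) (pairs : List (Int × Int)) (weights : List Int) :
    people_alt N pairs weights
      = (PySem.List.pyRange 1 (N+1) 1).map
          (fun i => (i, ((pvRecs pairs weights).filter (fun r => pvHit i r.2.1 r.2.2)).map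
                          (fun r => (pvOut i r.2.1 r.2.2, r.1)))) := by
  obtain ⟨hk0, hg0⟩ := pv_d0 (PySem.List.pyRange 1 (N+1) 1) PySem.Dict.empty
    (PySem.List.nodup_pyRange_one 1 (N+1)) (fun x _ => rfl)
  set d0 := (PySem.List.pyRange 1 (N+1) 1).foldl (fun d i => d.insert i []) PySem.Dict.empty with hd0
  have hk0' : d0.keys = PySem.List.pyRange 1 (N+1) 1 := by rw [hk0]; simp
  obtain ⟨hkF, hcF, hgF⟩ := pv_B_fold (pvRecs pairs weights) d0
  have hpeople : people_alt N pairs weights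
      = ((pvRecs pairs weights).foldl (fun d r =>
          let d' := if d.contains r.2.1 then d.modify r.2.1 [] (· ++ [(r.2.2, r.1)]) else d
          if d'.contains r.2.2 && !(r.2.2 == r.2.1) then d'.modify r.2.2 [] (· ++ [(r.2.1, r.1)]) else d') d0).items := rfl
  rw [hpeople, PySem.Dict.items_eq_map_keys _ (by rw [hkF, hk0']; exact PySem.List.nodup_pyRange_one 1 (N+1)) [],
    hkF]
  have hmap : ∀ i ∈ d0.keys,
      (i, ((pvRecs pairs weights).foldl (fun d r =>
          let d' := if d.contains r.2.1 then d.modify r.2.1 [] (· ++ [(r.2.2, r.1)]) else d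
          if d'.contains r.2.2 && !(r.2.2 == r.2.1) then d'.modify r.2.2 [] (· ++ [(r.2.1, r.1)]) else d') d0).getD i [])
        = (i, ((pvRecs pairs weights).filter (fun r => pvHit i r.2.1 r.2.2)).map
                (fun r => (pvOut i r.2.1 r.2.2, r.1))) := by
    intro i hi
    rw [hgF i ((PySem.Dict.contains_iff_mem_keys _ _).mpr hi), hg0 i]
    rfl
  rw [List.map_congr_left hmap, hk0']

theorem pv_enumerate_shift {α : Type} (xs : List α) : ∀ s : Int,
    PySem.List.enumerate xs (s+1) = (PySem.List.enumerate xs s).map (fun q => (q.1+1, q.2)) := by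
  induction xs with
  | nil => intro s; simp [PySem.List.enumerate_nil]
  | cons x xs ih =>
    intro s
    rw [PySem.List.enumerate_cons, PySem.List.enumerate_cons, List.map_cons, ih (s+1)]

theorem pv_core (i : Int) : ∀ (ps : List (Int × Int)) (ws : List Int),
    (∀ q ∈ PySem.List.enumerate ps 0, pvHit i q.2.1 q.2.2 = true → q.1 < (ws.length : Int)) →
    ((PySem.List.enumerate ps 0).filter (fun q => pvHit i q.2.1 q.2.2)).map
        (fun q => (pvOut i q.2.1 q.2.2, PySem.List.pyGetD ws q.1 0))
      = ((ps.zip ws).filter (fun pw => pvHit i pw.1.1 pw.1.2)).map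
          (fun pw => (pvOut i pw.1.1 pw.1.2, pw.2)) := by
  intro ps
  induction ps with
  | nil => intro ws _; simp [PySem.List.enumerate_nil]
  | cons p ps ih =>
    intro ws h
    have hshift : PySem.List.enumerate (p :: ps) 0
        = (0, p) :: (PySem.List.enumerate ps 0).map (fun q => (q.1+1, q.2)) := by
      rw [PySem.List.enumerate_cons, show (0:Int)+1 = 0+1 from rfl, pv_enumerate_shift ps 0]
    cases ws with
    | nil =>
      have hhead : pvHit i p.1 p.2 = false := by
        by_cases hp : pvHit i p.1 p.2
        · have := h (0, p) (by rw [hshift]; simp) hp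
          norm_num at this
        · simpa using hp
      have htail : ((PySem.List.enumerate ps 0).map (fun q => (q.1+1, q.2))).filter
          (fun q => pvHit i q.2.1 q.2.2) = [] := by
        rw [List.filter_eq_nil_iff]
        intro q hq
        rcases List.mem_map.mp hq with ⟨q0, hq0, rfl⟩
        intro hhit
        have hlt := h (q0.1 + 1, q0.2)
          (by rw [hshift]; exact List.mem_cons_of_mem _ (List.mem_map.mpr ⟨q0, hq0, rfl⟩))
          (by simpa using hhit)
        rcases (PySem.List.mem_enumerate_iff ps 0 q0).mp hq0 with ⟨k, hk, rfl⟩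
        simp at hlt
        omega
      rw [hshift, List.filter_cons, htail]
      simp [hhead]
    | cons w ws' =>
      have htail : (((PySem.List.enumerate ps 0).map (fun q => (q.1+1, q.2))).filter
            (fun q => pvHit i q.2.1 q.2.2)).map
            (fun q => (pvOut i q.2.1 q.2.2, PySem.List.pyGetD (w :: ws') q.1 0))
          = ((ps.zip ws').filter (fun pw => pvHit i pw.1.1 pw.1.2)).map
              (fun pw => (pvOut i pw.1.1 pw.1.2, pw.2)) := by
        rw [List.filter_map, List.map_map]
        have hstep : ((PySem.List.enumerate ps 0).filter
              (fun q => pvHit i q.2.1 q.2.2)).map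
              (fun q => (pvOut i q.2.1 q.2.2, PySem.List.pyGetD (w :: ws') (q.1 + 1) 0))
            = ((PySem.List.enumerate ps 0).filter (fun q => pvHit i q.2.1 q.2.2)).map
              (fun q => (pvOut i q.2.1 q.2.2, PySem.List.pyGetD ws' q.1 0)) := by
          apply List.map_congr_left
          intro q hq
          rcases (PySem.List.mem_enumerate_iff ps 0 q).mp (List.mem_of_mem_filter hq)
            with ⟨k, hk, rfl⟩
          have hcast : ((0:Int) + (k:Int)) + 1 = ((k+1 : Nat) : Int) := by push_cast; ring
          simp only [hcast, PySem.List.pyGetD_natCast]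
          have : ((0:Int) + (k:Int)) = ((k : Nat) : Int) := by push_cast; ring
          simp only [this, PySem.List.pyGetD_natCast]
          rfl
        have hcomp : (((PySem.List.enumerate ps 0).filter
              ((fun q => pvHit i q.2.1 q.2.2) ∘ (fun q : Int × (Int × Int) => (q.1+1, q.2)))).map
              ((fun q => (pvOut i q.2.1 q.2.2, PySem.List.pyGetD (w :: ws') q.1 0)) ∘ (fun q : Int × (Int × Int) => (q.1+1, q.2))))
            = ((PySem.List.enumerate ps 0).filter (fun q => pvHit i q.2.1 q.2.2)).map
              (fun q => (pvOut i q.2.1 q.2.2, PySem.List.pyGetD (w :: ws') (q.1 + 1) 0)) := rfl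
        rw [hcomp, hstep]
        apply ih
        intro q hq hhit
        have hlt := h (q.1 + 1, q.2)
          (by rw [hshift]; exact List.mem_cons_of_mem _ (List.mem_map.mpr ⟨q, hq, rfl⟩))
          (by simpa using hhit)
        rcases (PySem.List.mem_enumerate_iff ps 0 q).mp hq with ⟨k, hk, rfl⟩
        simp at hlt ⊢
        omega
      have hw : PySem.List.pyGetD (w :: ws') 0 0 = w := by
        have h0 : ((0 : Nat) : Int) = (0 : Int) := rfl
        rw [← h0, PySem.List.pyGetD_natCast]
        rfl
      rw [hshift, List.filter_cons, List.zip_cons_cons, List.filter_cons]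
      by_cases hp : pvHit i p.1 p.2
      · simp only [show pvHit i (0, p).2.1 (0, p).2.2 = true from hp,
          show pvHit i (p, w).1.1 (p, w).1.2 = true from hp, if_true, List.map_cons, htail, hw]
      · simp only [show pvHit i (0, p).2.1 (0, p).2.2 = false from Bool.not_eq_true _ ▸ (by simpa using hp),
          show pvHit i (p, w).1.1 (p, w).1.2 = false from Bool.not_eq_true _ ▸ (by simpa using hp),
          Bool.false_eq_true, if_false, htail]

theorem pv_pre_lists (N i : Int) (pairs : List (Int × Int)) (weights : List Int)
    (hpre : Pre_people N pairs weights) (hi : 1 ≤ i ∧ i ≤ N) :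
    pvPreA i pairs weights
      = (((pairs.zip weights).map (fun pw => (pw.2, pw.1.1, pw.1.2))).filter
            (fun r => pvHit i r.2.1 r.2.2)).map (fun r => (pvOut i r.2.1 r.2.2, r.1)) := by
  have hpush : (((pairs.zip weights).map (fun pw => (pw.2, pw.1.1, pw.1.2))).filter
            (fun r => pvHit i r.2.1 r.2.2)).map (fun r => (pvOut i r.2.1 r.2.2, r.1))
      = ((pairs.zip weights).filter (fun pw => pvHit i pw.1.1 pw.1.2)).map
          (fun pw => (pvOut i pw.1.1 pw.1.2, pw.2)) := by
    rw [List.filter_map, List.map_map]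
    rfl
  rw [hpush, pvPreA]
  apply pv_core
  intro q hq hhit
  apply hpre q hq
  rcases Bool.or_eq_true _ _ ▸ hhit with h | h
  · left; constructor <;> [skip; skip] <;> rw [eq_of_beq h] <;> [exact hi.1; exact hi.2]
  · right; constructor <;> [skip; skip] <;> rw [eq_of_beq h] <;> [exact hi.1; exact hi.2]

-- ===== VERDICT (by name: the statement is the Claim_ definition above) =====
theorem people_spec : Claim_equal_people := by
  intro N pairs weights hdom hpre
  unfold Spec_people
  rw [pv_A_items, pv_B_items]
  apply List.map_congr_left
  intro i hi
  have hmem := PySem.List.mem_pyRange_one.mp hi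
  have hiN : 1 ≤ i ∧ i ≤ N := ⟨hmem.1, by omega⟩
  congr 1
  rw [pv_pre_lists N i pairs weights hpre hiN, pvRecs,
    pv_filter_sorted (α := Int × Int × Int) (fun r => r.1) (fun r => pvHit i r.2.1 r.2.2),
    pv_map_sorted (fun r : Int × Int × Int => r.1) (fun e : Int × Int => e.2)
      (fun r => (pvOut i r.2.1 r.2.2, r.1)) (fun a => rfl)]
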